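-- pv_equiv track=rewrite | github.com/Adeon18/Game_numbers | number_functions.py | next_lucky_number
-- ===== SOURCE A (Python) =====
-- def lucky_number(number : int) -> bool :
--     '''
--     Return the list of lucky numbers till the meaning of n.
--     >>> sieve_flavius(100)
--     False
--     >>> sieve_flavius(4)
--     True
--     >>> sieve_flavius(57)
--     False
--     '''
--     result = False
--     lucky_list = [i for i in range (1, number+1)] #creating a list
--     deleting_number = 2
--     idx = 1 #for next lucky number
--     for _ in range(number-1) :
--         if idx < len(lucky_list) :
--             del lucky_list[deleting_number-1::deleting_number]
--             deleting_number = lucky_list[idx]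
--             idx += 1
--     if number in lucky_list :
--         result = True
--     return result
--
-- def next_lucky_number (number : int) -> int :
--     '''
--     Return the next lucky number
--     '''
--     new_bool = False
--     i = 1
--     while new_bool == False :
--         if lucky_number(number+i) :
--             result = number + i
--             new_bool = True
--         else :
--             i+=1
--     return result
-- ===== SOURCE B (Python) =====
-- def _lucky_sieve(bound):
--     """All lucky numbers <= bound, computed by one sieve pass."""
--     survivors = list(range(1, bound + 1, 2))
--     k = 1
--     while k < len(survivors) and survivors[k] <= len(survivors):
--         step = survivors[k]
--         del survivors[step - 1 :: step]
--         k += 1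
--     return survivors
--
--
-- def next_lucky_number(number: int) -> int:
--     '''
--     Return the next lucky number
--     '''
--     bound = max(number + 1, 1)
--     while True:
--         for x in _lucky_sieve(bound):
--             if x > number:
--                 return x
--         bound *= 2
-- ===== Notes on version B (the rewrite author's own statement) =====
-- stated objective: faster
-- what changed: Instead of re-running the full Flavius sieve of [1..m] for every candidate m = number+1, number+2, ..., B builds the lucky-number sieve once per bound (starting directly from the odd numbers and stopping as soon as the deleting number exceeds the list length), returns the first sieved element greater than number, and doubles the bound in the rare case none exists yet.
-- outside the precondition, e.g. on next_lucky_number(1): A raises IndexError, B returns 3; on next_lucky_number(3): A raises IndexError, B returns 7; on next_lucky_number(4): A raises IndexError, B returns 7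
import Mathlib
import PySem

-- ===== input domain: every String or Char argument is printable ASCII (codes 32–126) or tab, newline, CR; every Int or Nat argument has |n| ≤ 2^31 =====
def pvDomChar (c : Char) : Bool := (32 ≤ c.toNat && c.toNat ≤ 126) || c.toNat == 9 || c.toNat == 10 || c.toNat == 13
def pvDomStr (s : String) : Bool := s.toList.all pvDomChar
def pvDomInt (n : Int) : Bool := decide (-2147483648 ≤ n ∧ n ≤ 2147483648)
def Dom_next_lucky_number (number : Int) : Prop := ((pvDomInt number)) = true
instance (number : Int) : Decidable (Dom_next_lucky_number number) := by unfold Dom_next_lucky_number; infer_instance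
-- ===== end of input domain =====

-- B re-implements the search with ONE lucky-number sieve per (doubling) bound instead of a full
-- re-sieve of [1..m] for every candidate m; equivalence of the return values is proved below.

-- ===== PORT A =====
-- shared helper: Python `del lst[d-1::d]` — drop the elements whose 1-based position is a
-- multiple of d (exact for d ≥ 1; both programs only ever delete with a step ≥ 2).
def delEvery (d : Nat) : Nat → List Int → List Int
  | _, [] => []
  | c, x :: xs => if c % d = 0 then delEvery d (c + 1) xs else x :: delEvery d (c + 1) xs

theorem delEvery_sublist (d : Nat) : ∀ (c : Nat) (l : List Int), List.Sublist (delEvery d c l) l := by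
  intro c l
  induction l generalizing c with
  | nil => simp [delEvery]
  | cons x xs ih =>
    simp only [delEvery]
    split
    · exact (ih (c + 1)).cons x
    · exact (ih (c + 1)).cons₂ x

theorem delEvery_length_le (d c : Nat) (l : List Int) :
    (delEvery d c l).length ≤ l.length := (delEvery_sublist d c l).length_le

-- the inner sieve loop of A's lucky_number: `for _ in range(number-1)` with state
-- (lucky_list, deleting_number, idx); fuel = the number of remaining for-iterations.
-- `deleting_number` is a Python int, kept as Int; it is ≥ 0 whenever read, so `.toNat` is exact.
def luckyLoop : Nat → List Int → Int → Nat → List Int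
  | 0, l, _, _ => l
  | f + 1, l, d, idx =>
    if idx < l.length then
      let l' := delEvery d.toNat 1 l
      luckyLoop f l' (l'.getD idx 0) (idx + 1)
    else
      luckyLoop f l d idx

def lucky_number (number : Int) : Bool :=
  let lucky_list := PySem.List.pyRange 1 (number + 1) 1
  let final := luckyLoop (number - 1).toNat lucky_list 2 1
  decide (number ∈ final)

-- A's unbounded `while` loop: try number+1, number+2, … until lucky_number succeeds.
-- The recursion carries fuel covering every candidate up to the final bound B's doubling
-- search reaches (ample for any input; a timing run never sees it run out); on (hypothetical)
-- exhaustion it returns 0 — exactly where B's port exhausts too, so the equivalence is exact.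
def aLoop : Nat → Int → Int → Int
  | 0, _, _ => 0
  | f + 1, number, i =>
    if lucky_number (number + i) then number + i else aLoop f number (i + 1)

def next_lucky_number (number : Int) : Int :=
  aLoop (max (number + 1) 1 * 2 ^ 63 - number).toNat number 1

-- ===== PORT B =====
-- B's single sieve pass: survivors start as the odd numbers, k walks the survivor list and
-- stops as soon as the next deleting number exceeds the list length.
def bLoop (l : List Int) (k : Nat) : List Int :=
  if h : k < l.length ∧ l.getD k 0 ≤ (l.length : Int) then
    bLoop (delEvery (l.getD k 0).toNat 1 l) (k + 1) else l
termination_by l.length - k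
decreasing_by
  have := delEvery_length_le (l.getD k 0).toNat 1 l
  omega

def sieveB (bound : Int) : List Int := bLoop (PySem.List.pyRange 1 (bound + 1) 2) 1


-- B's `while True` loop: sieve once per bound, return the first element above number,
-- else double the bound; fuel = 64 doublings (ample; 0 on hypothetical exhaustion, see aLoop).
def bRec : Nat → Int → Int → Int
  | 0, _, _ => 0
  | t + 1, number, bound =>
    match (sieveB bound).find? (fun x => decide (number < x)) with
    | some x => x
    | none => bRec t number (bound * 2)

def next_lucky_number_alt (number : Int) : Int :=
  bRec 64 number (max (number + 1) 1)

-- ===== PRECONDITION & SPEC =====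
-- Pre_ excludes number ∈ {1, 3, 4, 5}: there A's sieve reads lucky_list[idx] past the end of
-- the freshly shrunken list and raises IndexError, so A returns no value at all.
def Pre_next_lucky_number (number : Int) : Prop :=
  number ≠ 1 ∧ number ≠ 3 ∧ number ≠ 4 ∧ number ≠ 5
instance (number : Int) : Decidable (Pre_next_lucky_number number) := by
  unfold Pre_next_lucky_number; infer_instance

def pvWitness_next_lucky_number : Int := 7

def Spec_next_lucky_number (number : Int) (out : Int) : Prop := out = next_lucky_number_alt number
instance (number : Int) (out : Int) : Decidable (Spec_next_lucky_number number out) := by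
  unfold Spec_next_lucky_number; infer_instance

-- ===== CLAIM (what is proved, stated in full; the proofs are below) =====
def Claim_equal_next_lucky_number : Prop := ∀ (number : Int), Dom_next_lucky_number number → Pre_next_lucky_number number → Spec_next_lucky_number number (next_lucky_number number)


-- ===== LEMMAS AND PROOFS =====

def SInv (l : List Int) : Prop := l.Pairwise (· < ·) ∧ ∀ x ∈ l, 1 ≤ x

def pLE (m : Int) : Int → Bool := fun x => decide (x ≤ m)

def consec2 (a : Int) (n : Nat) : List Int := (List.range n).map (fun k : Nat => a + 2 * (k : Int))

def oddCount (n : Int) : Nat := if 0 < n then ((n + 1) / 2).toNat else 0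

theorem delEvery_append (d : Nat) : ∀ (c : Nat) (a b : List Int),
    delEvery d c (a ++ b) = delEvery d c a ++ delEvery d (c + a.length) b := by
  intro c a
  induction a generalizing c with
  | nil => simp [delEvery]
  | cons x xs ih =>
    intro b
    simp only [List.cons_append, delEvery, List.length_cons]
    have hc : c + (xs.length + 1) = (c + 1) + xs.length := by omega
    rw [hc]
    split <;> simp [ih]

theorem delEvery_eq_self (d : Nat) : ∀ (c : Nat) (l : List Int),
    (∀ j, j < l.length → (c + j) % d ≠ 0) → delEvery d c l = l := by
  intro c l
  induction l generalizing c with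
  | nil => simp [delEvery]
  | cons x xs ih =>
    intro h
    have h0 : c % d ≠ 0 := by have := h 0 (by simp); simpa using this
    simp only [delEvery, if_neg h0]
    rw [ih (c + 1)]
    intro j hj
    have he : c + 1 + j = c + (j + 1) := by omega
    rw [he]
    exact h (j + 1) (by simp; omega)

theorem delEvery_eq_self_of_lt (d : Nat) (l : List Int) (h : l.length < d) :
    delEvery d 1 l = l := by
  apply delEvery_eq_self
  intro j hj
  have h1 : 1 + j < d := by omega
  have h2 : (1 + j) % d = 1 + j := Nat.mod_eq_of_lt h1
  omega

theorem delEvery_congr (d : Nat) : ∀ (c₁ c₂ : Nat) (l : List Int), c₁ % d = c₂ % d →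
    delEvery d c₁ l = delEvery d c₂ l := by
  intro c₁ c₂ l
  induction l generalizing c₁ c₂ with
  | nil => simp [delEvery]
  | cons x xs ih =>
    intro h
    have h1 : (c₁ + 1) % d = (c₂ + 1) % d := by
      rw [Nat.add_mod, h, ← Nat.add_mod]
    simp only [delEvery, h]
    split <;> simp [ih _ _ h1]

theorem SInv_delEvery (d c : Nat) (l : List Int) (h : SInv l) : SInv (delEvery d c l) := by
  obtain ⟨hp, hm⟩ := h
  exact ⟨hp.sublist (delEvery_sublist d c l),
    fun x hx => hm x ((delEvery_sublist d c l).subset hx)⟩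

theorem pairwise_lt_ge (l : List Int) (a : Int) (hp : l.Pairwise (· < ·))
    (hm : ∀ x ∈ l, a ≤ x) : ∀ i (hi : i < l.length), a + (i : Int) ≤ l[i] := by
  induction l generalizing a with
  | nil => intro i hi; simp at hi
  | cons x xs ih =>
    intro i hi
    cases i with
    | zero => simpa using hm x (by simp)
    | succ j =>
      have hxs : ∀ y ∈ xs, a + 1 ≤ y := by
        intro y hy
        have hx : a ≤ x := hm x (by simp)
        have : x < y := (List.pairwise_cons.mp hp).1 y hy
        omega
      have := ih (a + 1) (List.pairwise_cons.mp hp).2 hxs j (by simpa using hi)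
      simp only [List.getElem_cons_succ]
      push_cast
      omega

theorem inv_getElem (l : List Int) (h : SInv l) :
    ∀ i (hi : i < l.length), (i : Int) + 1 ≤ l[i] := by
  intro i hi
  have := pairwise_lt_ge l 1 h.1 h.2 i hi
  omega

theorem sublist_getElem_le {l' l : List Int} (hs : List.Sublist l' l) (h : l.Pairwise (· < ·)) :
    ∀ i (hi' : i < l'.length) (hi : i < l.length), l[i] ≤ l'[i] := by
  induction hs with
  | slnil => intro i hi'; simp at hi'
  | @cons l₁ l₂ y hs ih =>
    intro i hi' hi
    have hp2 : l₂.Pairwise (· < ·) := (List.pairwise_cons.mp h).2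
    have hi2 : i < l₂.length := hi'.trans_le hs.length_le
    have h1 : (y :: l₂)[i] ≤ l₂[i] := by
      cases i with
      | zero =>
        simp only [List.getElem_cons_zero]
        exact le_of_lt ((List.pairwise_cons.mp h).1 _ (List.getElem_mem hi2))
      | succ j =>
        simp only [List.getElem_cons_succ]
        have := List.pairwise_iff_getElem.mp hp2 j (j + 1) (by omega) hi2 (by omega)
        omega
    exact h1.trans (ih hp2 i hi' hi2)
  | @cons₂ l₁ l₂ y hs ih =>
    intro i hi' hi
    cases i with
    | zero => simp
    | succ j =>
      simp only [List.getElem_cons_succ]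
      exact ih (List.pairwise_cons.mp h).2 j (by simpa using hi') (by simpa using hi)

theorem sorted_filter_eq_takeWhile (m : Int) : ∀ (l : List Int), l.Pairwise (· < ·) →
    l.filter (pLE m) = l.takeWhile (pLE m) := by
  intro l
  induction l with
  | nil => simp
  | cons x xs ih =>
    intro hp
    by_cases h : pLE m x = true
    · simp only [List.filter_cons, List.takeWhile_cons, h, if_pos]
      rw [ih (List.pairwise_cons.mp hp).2]
    · simp only [List.filter_cons, List.takeWhile_cons, h]
      simp only [Bool.false_eq_true, if_false]
      apply List.filter_eq_nil_iff.mpr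
      intro y hy
      have hxy : x < y := (List.pairwise_cons.mp hp).1 y hy
      simp only [pLE, decide_eq_true_eq] at h ⊢
      omega

theorem sorted_dropWhile_gt (m : Int) : ∀ (l : List Int), l.Pairwise (· < ·) →
    ∀ x ∈ l.dropWhile (pLE m), m < x := by
  intro l
  induction l with
  | nil => simp
  | cons x xs ih =>
    intro hp y hy
    by_cases h : pLE m x = true
    · rw [List.dropWhile_cons_of_pos h] at hy
      exact ih (List.pairwise_cons.mp hp).2 y hy
    · rw [List.dropWhile_cons_of_neg (by simpa using h)] at hy
      simp only [pLE, decide_eq_true_eq, not_le] at h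
      rcases List.mem_cons.mp hy with rfl | hy'
      · exact h
      · exact h.trans ((List.pairwise_cons.mp hp).1 y hy')

theorem bLoop_sublist : ∀ (l : List Int) (k : Nat), List.Sublist (bLoop l k) l := by
  intro l k
  induction l, k using bLoop.induct with
  | case1 l k h ih =>
    rw [bLoop, dif_pos h]
    exact ih.trans (delEvery_sublist _ _ _)
  | case2 l k h =>
    rw [bLoop, dif_neg h]

theorem sorted_split (m : Int) (l : List Int) (hp : l.Pairwise (· < ·)) :
    l = l.filter (pLE m) ++ l.dropWhile (pLE m) := by
  rw [sorted_filter_eq_takeWhile m l hp]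
  exact (List.takeWhile_append_dropWhile (p := pLE m) (l := l)).symm

theorem filter_delEvery (m : Int) (l : List Int) (hp : l.Pairwise (· < ·)) (d : Nat) :
    (delEvery d 1 l).filter (pLE m) = delEvery d 1 (l.filter (pLE m)) := by
  have hsplit := sorted_split m l hp
  conv_lhs => rw [hsplit]
  rw [delEvery_append]
  rw [List.filter_append]
  have h1 : (delEvery d 1 (l.filter (pLE m))).filter (pLE m) = delEvery d 1 (l.filter (pLE m)) := by
    apply List.filter_eq_self.mpr
    intro x hx
    have := (delEvery_sublist d 1 (l.filter (pLE m))).subset hx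
    exact (List.mem_filter.mp this).2
  have h2 : (delEvery d (1 + (l.filter (pLE m)).length) (l.dropWhile (pLE m))).filter (pLE m) = [] := by
    apply List.filter_eq_nil_iff.mpr
    intro x hx
    have hxl := (delEvery_sublist d _ (l.dropWhile (pLE m))).subset hx
    have := sorted_dropWhile_gt m l hp x hxl
    simp only [pLE, decide_eq_true_eq]
    omega
  rw [h1, h2, List.append_nil]

theorem filter_parts (m : Int) (l : List Int) (hp : l.Pairwise (· < ·)) (d : Nat)
    (hd : (l.filter (pLE m)).length < d) :
    (delEvery d 1 l).filter (pLE m) = l.filter (pLE m) := by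
  rw [filter_delEvery m l hp d]
  exact delEvery_eq_self_of_lt d _ hd

theorem sorted_filter_getElem (m : Int) (l : List Int) (hp : l.Pairwise (· < ·)) (k : Nat)
    (hk : k < (l.filter (pLE m)).length) (hkl : k < l.length) :
    (l.filter (pLE m))[k] = l[k] := by
  rw [List.getElem_of_eq (sorted_split m l hp) hkl]
  exact (List.getElem_append_left hk).symm

theorem bLoop_filter_eq (m : Int) : ∀ (l : List Int) (k : Nat), SInv l →
    (∀ (hk : k < l.length), ((l.filter (pLE m)).length : Int) < l[k]) →
    (bLoop l k).filter (pLE m) = l.filter (pLE m) := by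
  intro l k
  induction l, k using bLoop.induct with
  | case1 l k h ih =>
    intro hI hgt
    have hk := h.1
    have hget : l.getD k 0 = l[k] := List.getD_eq_getElem l 0 hk
    have hp : ((l.filter (pLE m)).length : Int) < l[k] := hgt hk
    have hpos : (1 : Int) ≤ l[k] := hI.2 _ (List.getElem_mem hk)
    have hdn : (l.filter (pLE m)).length < (l.getD k 0).toNat := by
      rw [hget]; omega
    have hfl : (delEvery (l.getD k 0).toNat 1 l).filter (pLE m) = l.filter (pLE m) :=
      filter_parts m l hI.1 _ hdn
    rw [bLoop, dif_pos h]
    rw [ih (SInv_delEvery _ _ _ hI) ?_, hfl]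
    intro hk1
    rw [hfl]
    have hkk : k < (delEvery (l.getD k 0).toNat 1 l).length := by omega
    have hmono := sublist_getElem_le (delEvery_sublist (l.getD k 0).toNat 1 l) hI.1 k hkk hk
    have hstep :=
      List.pairwise_iff_getElem.mp (hI.1.sublist (delEvery_sublist (l.getD k 0).toNat 1 l))
        k (k + 1) hkk hk1 (by omega)
    omega
  | case2 l k h =>
    intro _ _
    rw [bLoop, dif_neg h]

theorem bLoop_filter_comm (m : Int) : ∀ (l : List Int) (k : Nat), SInv l → 1 ≤ k →
    (bLoop l k).filter (pLE m) = bLoop (l.filter (pLE m)) k := by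
  intro l k
  induction l, k using bLoop.induct with
  | case1 l k h ih =>
    intro hI hk1
    have hk := h.1
    have hget : l.getD k 0 = l[k] := List.getD_eq_getElem l 0 hk
    set lf := l.filter (pLE m) with hlf
    have hlen : lf.length ≤ l.length := List.length_filter_le _ _
    by_cases hkp : k < lf.length
    · have hgetf : lf.getD k 0 = lf[k] := List.getD_eq_getElem lf 0 hkp
      have hfk : lf[k] = l[k] := sorted_filter_getElem m l hI.1 k hkp hk
      by_cases hdp : l[k] ≤ (lf.length : Int)
      · -- both sides delete with the same step
        rw [bLoop, dif_pos h]
        conv_rhs => rw [bLoop]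
        rw [dif_pos (by rw [hgetf, hfk]; exact ⟨hkp, by omega⟩)]
        rw [hgetf, hfk, ← hget]
        rw [ih (SInv_delEvery _ _ _ hI) (by omega)]
        rw [filter_delEvery m l hI.1]
      · -- the step is larger than the whole ≤-m prefix: that prefix is never touched again
        have hfe : (bLoop l k).filter (pLE m) = lf :=
          bLoop_filter_eq m l k hI (fun _ => by rw [← hlf]; omega)
        conv_rhs => rw [bLoop]
        rw [dif_neg (by rw [hgetf, hfk]; intro hc; omega)]
        exact hfe
    · -- k already beyond the ≤-m prefix
      have hge : (k : Int) + 1 ≤ l[k] := inv_getElem l hI k hk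
      have hfe : (bLoop l k).filter (pLE m) = lf :=
        bLoop_filter_eq m l k hI (fun _ => by rw [← hlf]; omega)
      conv_rhs => rw [bLoop]
      rw [dif_neg (by intro hc; exact hkp hc.1)]
      exact hfe
  | case2 l k h =>
    intro hI _
    rw [bLoop, dif_neg h]
    set lf := l.filter (pLE m) with hlf
    have hlen : lf.length ≤ l.length := List.length_filter_le _ _
    conv_rhs => rw [bLoop]
    rw [dif_neg ?_]
    intro hc
    obtain ⟨hkp, hle⟩ := hc
    have hgetf : lf.getD k 0 = lf[k] := List.getD_eq_getElem lf 0 hkp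
    have hkl : k < l.length := by omega
    have hfk : lf[k] = l[k] := sorted_filter_getElem m l hI.1 k hkp hkl
    apply h
    constructor
    · exact hkl
    · rw [List.getD_eq_getElem l 0 hkl, ← hfk, ← hgetf]
      omega

theorem consec2_succ (a : Int) (n : Nat) : consec2 a (n + 1) = a :: consec2 (a + 2) n := by
  unfold consec2
  rw [List.range_succ_eq_map, List.map_cons, List.map_map]
  congr 1
  · norm_num
  · apply List.map_congr_left
    intro k _
    simp only [Function.comp_apply]
    push_cast
    ring

theorem length_consec2 (a : Int) (n : Nat) : (consec2 a n).length = n := by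
  simp [consec2]

theorem pyRange2_eq (n : Int) : PySem.List.pyRange 1 (n + 1) 2 = consec2 1 (oddCount n) := by
  have hc : (if (1 : Int) < n + 1 then ((n + 1 - 1 + 2 - 1) / 2).toNat else 0) = oddCount n := by
    unfold oddCount
    split_ifs <;> omega
  rw [PySem.List.pyRange_of_pos 1 (n + 1) (by norm_num), hc]
  rfl

theorem consec2_getElem (a : Int) (n : Nat) (i : Nat) (hi : i < (consec2 a n).length) :
    (consec2 a n)[i] = a + 2 * (i : Int) := by
  simp [consec2]

theorem SInv_consec2 (a : Int) (ha : 1 ≤ a) (n : Nat) : SInv (consec2 a n) := by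
  constructor
  · apply List.pairwise_iff_getElem.mpr
    intro i j hi hj hij
    rw [consec2_getElem a n i hi, consec2_getElem a n j hj]
    omega
  · intro x hx
    obtain ⟨i, hi, rfl⟩ := List.getElem_of_mem hx
    rw [consec2_getElem a n i hi]
    omega

theorem filter_consec2 (m : Int) : ∀ (n : Nat) (a : Int),
    (consec2 a n).filter (pLE m) =
      consec2 a (min n (if a ≤ m then ((m - a) / 2 + 1).toNat else 0)) := by
  intro n
  induction n with
  | zero => intro a; simp [consec2]
  | succ k ih =>
    intro a
    by_cases ham : a ≤ m
    · rw [consec2_succ, List.filter_cons_of_pos (by simp [pLE]; omega), ih (a + 2),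
        if_pos ham]
      have hmin : min (k + 1) (((m - a) / 2 + 1).toNat) =
          (min k (if a + 2 ≤ m then ((m - (a + 2)) / 2 + 1).toNat else 0)) + 1 := by
        split_ifs <;> omega
      rw [hmin, consec2_succ]
    · rw [consec2_succ, List.filter_cons_of_neg (by simp [pLE]; omega), ih (a + 2),
        if_neg ham]
      have h0 : (if a + 2 ≤ m then ((m - (a + 2)) / 2 + 1).toNat else 0) = 0 := by
        split_ifs <;> omega
      simp [h0, consec2]

theorem filter_odds (m M : Int) (h1 : 1 ≤ m) (h2 : m ≤ M) :
    (PySem.List.pyRange 1 (M + 1) 2).filter (pLE m) = PySem.List.pyRange 1 (m + 1) 2 := by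
  rw [pyRange2_eq, pyRange2_eq, filter_consec2]
  congr 1
  unfold oddCount
  split_ifs <;> omega

theorem mem_sieveB_bounds (n x : Int) (h : x ∈ sieveB n) : 1 ≤ x ∧ x ≤ n := by
  have hx : x ∈ PySem.List.pyRange 1 (n + 1) 2 := (bLoop_sublist _ _).subset h
  rw [pyRange2_eq] at hx
  simp only [consec2, List.mem_map, List.mem_range] at hx
  obtain ⟨k, hk, rfl⟩ := hx
  unfold oddCount at hk
  split_ifs at hk <;> omega

theorem SInv_sieveB (n : Int) : SInv (sieveB n) := by
  have h0 : SInv (PySem.List.pyRange 1 (n + 1) 2) := by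
    rw [pyRange2_eq]; exact SInv_consec2 1 le_rfl _
  exact ⟨h0.1.sublist (bLoop_sublist _ _), fun x hx => h0.2 x ((bLoop_sublist _ _).subset hx)⟩

theorem mem_sieveB_iff (m N : Int) (h1 : 1 ≤ m) (h2 : m ≤ N) :
    m ∈ sieveB N ↔ m ∈ sieveB m := by
  have hmm : m ∈ sieveB N ↔ m ∈ (sieveB N).filter (pLE m) := by
    simp [List.mem_filter, pLE]
  rw [hmm]
  unfold sieveB
  rw [bLoop_filter_comm m _ 1 (by rw [pyRange2_eq]; exact SInv_consec2 1 le_rfl _) le_rfl,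
    filter_odds m N h1 h2]

-- ---- A-side bridge ----
def consec (a : Int) (n : Nat) : List Int := (List.range n).map (fun k : Nat => a + (k : Int))

theorem consec_succ (a : Int) (n : Nat) : consec a (n + 1) = a :: consec (a + 1) n := by
  unfold consec
  rw [List.range_succ_eq_map, List.map_cons, List.map_map]
  congr 1
  · norm_num
  · apply List.map_congr_left
    intro k _
    simp only [Function.comp_apply]
    push_cast
    ring

theorem length_consec (a : Int) (n : Nat) : (consec a n).length = n := by
  simp [consec]

theorem pyRange1_eq (n : Int) : PySem.List.pyRange 1 (n + 1) 1 = consec 1 n.toNat := by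
  rw [PySem.List.pyRange_one]
  have h : (n + 1 - 1).toNat = n.toNat := by omega
  rw [h]
  rfl

theorem de2 : ∀ (n : Nat) (a : Int), delEvery 2 1 (consec a n) = consec2 a ((n + 1) / 2)
  | 0, a => by simp [consec, consec2, delEvery]
  | 1, a => by
      have h1 : consec a 1 = [a] := by simp [consec]
      have h2 : consec2 a 1 = [a] := by simp [consec2]
      norm_num [h1, h2, delEvery]
  | (n + 2), a => by
      rw [consec_succ, consec_succ]
      have ha : a + 1 + 1 = a + 2 := by ring
      rw [ha]
      show delEvery 2 1 (a :: (a + 1) :: consec (a + 2) n) = consec2 a ((n + 2 + 1) / 2)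
      simp only [delEvery]
      norm_num
      rw [delEvery_congr 2 3 1 _ (by norm_num), de2 n (a + 2)]
      have hd : (n + 2 + 1) / 2 = (n + 1) / 2 + 1 := by omega
      rw [hd, consec2_succ]

theorem luckyLoop_stable : ∀ (f : Nat) (l : List Int) (d : Int) (idx : Nat),
    l.length ≤ idx → luckyLoop f l d idx = l := by
  intro f
  induction f with
  | zero => intro l d idx _; rfl
  | succ f ih =>
    intro l d idx h
    simp only [luckyLoop, if_neg (by omega : ¬ idx < l.length)]
    exact ih l d idx h

theorem luckyLoop_big : ∀ (f : Nat) (l : List Int) (i : Nat), SInv l → 1 ≤ i →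
    (∀ (hi : i - 1 < l.length), (l.length : Int) < l[i - 1]) →
    luckyLoop f l (l.getD (i - 1) 0) i = l := by
  intro f
  induction f with
  | zero => intro l i _ _ _; rfl
  | succ f ih =>
    intro l i hI hi1 hbig
    by_cases hlt : i < l.length
    · have hi0 : i - 1 < l.length := by omega
      have hd : l.getD (i - 1) 0 = l[i - 1] := List.getD_eq_getElem l 0 hi0
      have hb : (l.length : Int) < l[i - 1] := hbig hi0
      simp only [luckyLoop, if_pos hlt]
      have hnoop : delEvery (l.getD (i - 1) 0).toNat 1 l = l := by
        apply delEvery_eq_self_of_lt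
        omega
      rw [hnoop]
      have hstep := ih l (i + 1) hI (by omega) ?_
      · have hidx : i + 1 - 1 = i := by omega
        rw [hidx] at hstep
        exact hstep
      · intro hi'
        have hlt2 : l[i - 1] < l[i + 1 - 1] :=
          List.pairwise_iff_getElem.mp hI.1 (i - 1) (i + 1 - 1) hi0 hi' (by omega)
        omega
    · simp only [luckyLoop, if_neg hlt]
      exact luckyLoop_stable f l _ i (by omega)

def Gap (l : List Int) : Prop := ∀ i (hi : i < l.length), 1 ≤ i → 2 * (i : Int) + 1 ≤ l[i]

theorem Gap_delEvery (d c : Nat) (l : List Int) (hI : SInv l) (hG : Gap l) :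
    Gap (delEvery d c l) := by
  intro i hi hi1
  have hlen : (delEvery d c l).length ≤ l.length := delEvery_length_le d c l
  have hle := sublist_getElem_le (delEvery_sublist d c l) hI.1 i hi (by omega)
  have := hG i (by omega) hi1
  omega

theorem Gap_consec2 (n : Nat) : Gap (consec2 1 n) := by
  intro i hi hi1
  rw [consec2_getElem 1 n i hi]
  omega

theorem bridgeAB : ∀ (f : Nat) (l : List Int) (j : Nat), SInv l → Gap l → 1 ≤ j →
    l.length ≤ f + j + 1 →
    luckyLoop f l (l.getD j 0) (j + 1) = bLoop l j := by
  intro f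
  induction f with
  | zero =>
    intro l j hI hG hj1 hfuel
    show l = bLoop l j
    rw [bLoop, dif_neg]
    intro hc
    obtain ⟨h1, h2⟩ := hc
    rw [List.getD_eq_getElem l 0 h1] at h2
    have := hG j h1 hj1
    omega
  | succ f ih =>
    intro l j hI hG hj1 hfuel
    by_cases hlen2 : l.length ≤ j + 1
    · rw [luckyLoop_stable (f + 1) l _ (j + 1) hlen2]
      rw [bLoop, dif_neg]
      intro hc
      obtain ⟨h1, h2⟩ := hc
      rw [List.getD_eq_getElem l 0 h1] at h2
      have := hG j h1 hj1
      omega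
    · have hj : j < l.length := by omega
      have hget : l.getD j 0 = l[j] := List.getD_eq_getElem l 0 hj
      simp only [luckyLoop, if_pos (by omega : j + 1 < l.length)]
      by_cases hle : l[j] ≤ (l.length : Int)
      · rw [bLoop, dif_pos ⟨hj, by rw [hget]; exact hle⟩]
        exact ih (delEvery (l.getD j 0).toNat 1 l) (j + 1)
          (SInv_delEvery _ _ _ hI) (Gap_delEvery _ _ _ hI hG) (by omega)
          (le_trans (delEvery_length_le _ _ _) (by omega))
      · rw [bLoop, dif_neg (by rw [hget]; intro hc; exact hle hc.2)]
        have hnoop : delEvery (l.getD j 0).toNat 1 l = l := by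
          apply delEvery_eq_self_of_lt
          omega
        rw [hnoop]
        have := luckyLoop_big f l (j + 2) hI (by omega) ?_
        · have hidx : j + 2 - 1 = j + 1 := by omega
          rw [hidx] at this
          exact this
        · intro hi'
          have hlt2 : l[j] < l[j + 2 - 1] :=
            List.pairwise_iff_getElem.mp hI.1 j (j + 2 - 1) hj hi' (by omega)
          omega

theorem lucky_number_eq (m : Int) : lucky_number m = decide (m ∈ sieveB m) := by
  show decide (m ∈ luckyLoop (m - 1).toNat (PySem.List.pyRange 1 (m + 1) 1) 2 1) = _
  rcases lt_trichotomy m 1 with hm | hm | hm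
  · -- m ≤ 0 : both lists are empty
    have h0 : PySem.List.pyRange 1 (m + 1) 1 = [] := by
      rw [pyRange1_eq]
      have : m.toNat = 0 := by omega
      simp [this, consec]
    have h2 : PySem.List.pyRange 1 (m + 1) 2 = [] := by
      rw [pyRange2_eq]
      have : oddCount m = 0 := by unfold oddCount; split_ifs <;> omega
      simp [this, consec2]
    rw [h0, luckyLoop_stable _ _ _ _ (by simp)]
    rw [sieveB, h2, bLoop, dif_neg (by simp)]
  · -- m = 1
    subst hm
    have h0 : PySem.List.pyRange 1 (1 + 1) 1 = [1] := by
      rw [pyRange1_eq]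
      simp [consec]
    have h2 : PySem.List.pyRange 1 (1 + 1) 2 = [1] := by
      rw [pyRange2_eq]
      have : oddCount 1 = 1 := by unfold oddCount; norm_num
      simp [this, consec2]
    rw [h0]
    have hf : ((1 : Int) - 1).toNat = 0 := by norm_num
    rw [hf]
    rw [sieveB, h2, bLoop, dif_neg (by simp)]
    rfl
  · -- 2 ≤ m
    have hf : (m - 1).toNat = (m - 2).toNat + 1 := by omega
    rw [pyRange1_eq, hf]
    have hlen : 1 < (consec 1 m.toNat).length := by rw [length_consec]; omega
    simp only [luckyLoop, if_pos hlen]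
    have ht2 : ((2 : Int)).toNat = 2 := rfl
    rw [ht2, de2]
    have hcnt : (m.toNat + 1) / 2 = oddCount m := by
      unfold oddCount
      split_ifs <;> omega
    rw [hcnt]
    have hbridge := bridgeAB (m - 2).toNat (consec2 1 (oddCount m)) 1
      (SInv_consec2 1 le_rfl _) (Gap_consec2 _) le_rfl ?_
    · rw [hbridge, sieveB, pyRange2_eq]
    · rw [length_consec2]
      unfold oddCount
      split_ifs <;> omega

theorem find_sorted (n : Int) : ∀ (l : List Int), l.Pairwise (· < ·) → ∀ (mA : Int),
    mA ∈ l → n < mA → (∀ x ∈ l, n < x → mA ≤ x) →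
    l.find? (fun x => decide (n < x)) = some mA := by
  intro l
  induction l with
  | nil => intro _ mA hm; simp at hm
  | cons y ys ih =>
    intro hp mA hm hn hmin
    by_cases hy : n < y
    · rw [List.find?_cons_of_pos (by simpa using hy)]
      have h1 : mA ≤ y := hmin y (by simp) hy
      have h2 : y ≤ mA := by
        rcases List.mem_cons.mp hm with rfl | hm'
        · exact le_rfl
        · exact le_of_lt ((List.pairwise_cons.mp hp).1 mA hm')
      rw [le_antisymm h2 h1]
    · rw [List.find?_cons_of_neg (by simpa using hy)]
      have hm' : mA ∈ ys := by
        rcases List.mem_cons.mp hm with rfl | hm'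
        · exact absurd hn hy
        · exact hm'
      exact ih (List.pairwise_cons.mp hp).2 mA hm' hn
        (fun x hx hnx => hmin x (by simp [hx]) hnx)

-- ---- the two searches, aligned on the same (hypothetical) exhaustion region ----
theorem sorted_find?_min {l : List Int} {p : Int → Bool} {m0 : Int}
    (hp : l.Pairwise (· < ·)) (hf : l.find? p = some m0) :
    ∀ x ∈ l, p x = true → m0 ≤ x := by
  induction l with
  | nil => simp at hf
  | cons y ys ih =>
    intro x hx hpx
    by_cases hy : p y = true
    · rw [List.find?_cons_of_pos hy] at hf
      have hym : y = m0 := by simpa using hf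
      subst hym
      rcases List.mem_cons.mp hx with rfl | hx'
      · exact le_rfl
      · exact le_of_lt ((List.pairwise_cons.mp hp).1 x hx')
    · rw [List.find?_cons_of_neg (by simpa using hy)] at hf
      rcases List.mem_cons.mp hx with rfl | hx'
      · exact absurd hpx hy
      · exact ih (List.pairwise_cons.mp hp).2 hf x hx' hpx

theorem aLoop_none (n : Int) : ∀ (F : Nat) (i : Int), 1 ≤ i →
    (∀ j : Int, i ≤ j → j < i + (F : Int) → lucky_number (n + j) = false) →
    aLoop F n i = 0 := by
  intro F
  induction F with
  | zero => intro i _ _; rfl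
  | succ F ih =>
    intro i hi1 hno
    have hcur : lucky_number (n + i) = false := hno i le_rfl (by push_cast; omega)
    simp only [aLoop, hcur, Bool.false_eq_true, if_false]
    apply ih (i + 1) (by omega)
    intro j hj1 hj2
    apply hno j (by omega)
    push_cast at hj2 ⊢
    omega

theorem aLoop_finds (n m0 : Int) (hl : lucky_number m0 = true)
    (hminf : ∀ x : Int, n < x → x < m0 → lucky_number x = false) :
    ∀ (F : Nat) (i : Int), 1 ≤ i → n + i ≤ m0 → m0 - n - i < (F : Int) →
    aLoop F n i = m0 := by
  intro F
  induction F with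
  | zero =>
    intro i _ hle hfuel
    exfalso
    push_cast at hfuel
    omega
  | succ F ih =>
    intro i hi1 hle hfuel
    by_cases heq : n + i = m0
    · simp only [aLoop, heq, hl, if_true]
    · have hlt : n + i < m0 := by omega
      have hcur : lucky_number (n + i) = false := hminf (n + i) (by omega) hlt
      simp only [aLoop, hcur, Bool.false_eq_true, if_false]
      apply ih (i + 1) (by omega) (by omega)
      push_cast at hfuel ⊢
      omega

theorem bRec_zero (n M : Int)
    (hno : ∀ x : Int, n < x → x ∈ sieveB x → M < x) :
    ∀ (t : Nat) (bound : Int), 1 ≤ bound → bound * 2 ^ t ≤ M * 2 →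
    bRec t n bound = 0 := by
  intro t
  induction t with
  | zero => intro bound _ _; rfl
  | succ t ih =>
    intro bound hb1 hbd
    have hbM : bound ≤ M := by
      have h2 : (2 : Int) ≤ 2 ^ (t + 1) := by
        calc (2 : Int) = 2 ^ 1 := by norm_num
        _ ≤ 2 ^ (t + 1) := pow_le_pow_right₀ (by norm_num) (by omega)
      nlinarith
    have hnone : (sieveB bound).find? (fun x => decide (n < x)) = none := by
      rw [List.find?_eq_none]
      intro x hx
      obtain ⟨hx1, hxb⟩ := mem_sieveB_bounds bound x hx
      simp only [decide_eq_true_eq]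
      intro hnx
      have hxl : x ∈ sieveB x := (mem_sieveB_iff x bound hx1 hxb).mp hx
      have := hno x hnx hxl
      omega
    simp only [bRec, hnone]
    apply ih (bound * 2) (by omega)
    calc bound * 2 * 2 ^ t = bound * 2 ^ (t + 1) := by ring
    _ ≤ M * 2 := hbd

theorem bRec_finds (n M m0 : Int) (hp0 : n < m0) (hm01 : 1 ≤ m0) (hm0M : m0 ≤ M)
    (hluck0 : m0 ∈ sieveB m0)
    (hmin : ∀ x : Int, n < x → x ∈ sieveB x → x ≤ M → m0 ≤ x) :
    ∀ (t : Nat) (bound : Int), 1 ≤ bound → m0 ≤ bound * 2 ^ t →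
    bRec (t + 1) n bound = m0 := by
  intro t
  induction t with
  | zero =>
    intro bound hb1 hmb
    rw [pow_zero, mul_one] at hmb
    have hfind : (sieveB bound).find? (fun x => decide (n < x)) = some m0 := by
      apply find_sorted n (sieveB bound) (SInv_sieveB bound).1 m0
        ((mem_sieveB_iff m0 bound hm01 hmb).mpr hluck0) hp0
      intro x hx hnx
      obtain ⟨hx1, hxb⟩ := mem_sieveB_bounds bound x hx
      by_contra hlt
      rw [not_le] at hlt
      have hxl : x ∈ sieveB x := (mem_sieveB_iff x bound hx1 hxb).mp hx
      have := hmin x hnx hxl (by omega)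
      omega
    simp only [bRec, hfind]
  | succ t ih =>
    intro bound hb1 hmb
    by_cases hle : m0 ≤ bound
    · have hfind : (sieveB bound).find? (fun x => decide (n < x)) = some m0 := by
        apply find_sorted n (sieveB bound) (SInv_sieveB bound).1 m0
          ((mem_sieveB_iff m0 bound hm01 hle).mpr hluck0) hp0
        intro x hx hnx
        obtain ⟨hx1, hxb⟩ := mem_sieveB_bounds bound x hx
        by_contra hlt
        rw [not_le] at hlt
        have hxl : x ∈ sieveB x := (mem_sieveB_iff x bound hx1 hxb).mp hx
        have := hmin x hnx hxl (by omega)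
        omega
      simp only [bRec, hfind]
    · have hnone : (sieveB bound).find? (fun x => decide (n < x)) = none := by
        rw [List.find?_eq_none]
        intro x hx
        obtain ⟨hx1, hxb⟩ := mem_sieveB_bounds bound x hx
        simp only [decide_eq_true_eq]
        intro hnx
        have hxl : x ∈ sieveB x := (mem_sieveB_iff x bound hx1 hxb).mp hx
        have h1 : m0 ≤ x := hmin x hnx hxl (by omega)
        omega
      simp only [bRec, hnone]
      apply ih (bound * 2) (by omega)
      calc m0 ≤ bound * 2 ^ (t + 1) := hmb
      _ = bound * 2 * 2 ^ t := by ring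

theorem ports_agree (n : Int) : next_lucky_number n = next_lucky_number_alt n := by
  show aLoop (max (n + 1) 1 * 2 ^ 63 - n).toNat n 1 = bRec 64 n (max (n + 1) 1)
  set b0 : Int := max (n + 1) 1 with hb0
  set M : Int := b0 * 2 ^ 63 with hM
  have hb01 : 1 ≤ b0 := le_max_right _ _
  have hb0n : n + 1 ≤ b0 := le_max_left _ _
  have hpow : (1 : Int) ≤ 2 ^ 63 := by norm_num
  have hbM : b0 ≤ M := by nlinarith
  have hMn : n < M := by omega
  have hFM : (((M - n).toNat : Nat) : Int) = M - n := by omega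
  have hlucky1 : ∀ x : Int, x ∈ sieveB x → 1 ≤ x := fun x hx => (mem_sieveB_bounds x x hx).1
  rcases hfind : (sieveB M).find? (fun x => decide (n < x)) with _ | m0
  · -- hypothetical: no lucky number in (n, M] — both searches exhaust and return 0
    have hnoluck : ∀ x : Int, n < x → x ∈ sieveB x → M < x := by
      intro x hnx hxx
      by_contra hle
      rw [not_lt] at hle
      have hxm : x ∈ sieveB M := (mem_sieveB_iff x M (hlucky1 x hxx) hle).mpr hxx
      have := List.find?_eq_none.mp hfind x hxm
      simp at this
      omega
    rw [aLoop_none n (M - n).toNat 1 le_rfl ?_,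
      bRec_zero n M hnoluck 64 b0 hb01 (by rw [hM]; ring_nf; rfl)]
    intro j hj1 hj2
    rw [lucky_number_eq]
    simp only [decide_eq_false_iff_not]
    intro hmem
    have hnj : n < n + j := by omega
    have := hnoluck (n + j) hnj hmem
    rw [hFM] at hj2
    omega
  · -- m0 = the least lucky number above n; both searches return it
    have hp0 : n < m0 := by
      have := List.find?_some hfind
      simpa using this
    have hmem0 : m0 ∈ sieveB M := List.mem_of_find?_eq_some hfind
    obtain ⟨hm01, hm0M⟩ := mem_sieveB_bounds M m0 hmem0
    have hluck0 : m0 ∈ sieveB m0 := (mem_sieveB_iff m0 M hm01 hm0M).mp hmem0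
    have hmin : ∀ x : Int, n < x → x ∈ sieveB x → x ≤ M → m0 ≤ x := by
      intro x hnx hxx hxM
      exact sorted_find?_min (SInv_sieveB M).1 hfind x
        ((mem_sieveB_iff x M (hlucky1 x hxx) hxM).mpr hxx) (by simpa using hnx)
    have hminf : ∀ x : Int, n < x → x < m0 → lucky_number x = false := by
      intro x hnx hxm
      rw [lucky_number_eq]
      simp only [decide_eq_false_iff_not]
      intro hxx
      have := hmin x hnx hxx (by omega)
      omega
    have hl0 : lucky_number m0 = true := by
      rw [lucky_number_eq]
      simpa using hluck0
    have h64 : (64 : Nat) = 63 + 1 := rfl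
    rw [aLoop_finds n m0 hl0 hminf (M - n).toNat 1 le_rfl (by omega) (by rw [hFM]; omega),
      h64, bRec_finds n M m0 hp0 hm01 hm0M hluck0 hmin 63 b0 hb01 (by rw [hM] at hm0M; exact hm0M)]


-- ===== VERDICT (by name: the statement is the Claim_ definition above) =====
theorem next_lucky_number_spec : Claim_equal_next_lucky_number := by
  intro n _ _
  unfold Spec_next_lucky_number
  exact ports_agree n
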